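-- pv_equiv track=rewrite | github.com/JP311082/ds50 | Final Project/Scripts/rightmove_scraper/scrape.py | get_location_search_url
-- ===== SOURCE A (Python) =====
-- def get_location_search_url(input_term):
--     """
--     Used to translate a location search term (eg Twickenham) into a relevant input for the Rightmove API.
--     """
--     location_identifier = ''
--     count = 0
--
--     for char in input_term:
--         if count == 2:
--             location_identifier += '/'
--             count = 0
--         location_identifier += char.upper()
--         count += 1
--
--     return location_identifier
-- ===== SOURCE B (Python) =====
-- def get_location_search_url(input_term):
--     """
--     Used to translate a location search term (eg Twickenham) into a relevant input for the Rightmove API.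
--     """
--     chars = [c.upper() for c in input_term]
--     return '/'.join(''.join(chars[i:i + 2]) for i in range(0, len(chars), 2))
-- ===== Notes on version B (the rewrite author's own statement) =====
-- stated objective: idiomatic
-- what changed: Replaces A's running-counter character-by-character accumulation with a chunk-and-join: uppercase each character, slice the list into consecutive pairs by index, and join the pairs with the slash separator.
import Mathlib
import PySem

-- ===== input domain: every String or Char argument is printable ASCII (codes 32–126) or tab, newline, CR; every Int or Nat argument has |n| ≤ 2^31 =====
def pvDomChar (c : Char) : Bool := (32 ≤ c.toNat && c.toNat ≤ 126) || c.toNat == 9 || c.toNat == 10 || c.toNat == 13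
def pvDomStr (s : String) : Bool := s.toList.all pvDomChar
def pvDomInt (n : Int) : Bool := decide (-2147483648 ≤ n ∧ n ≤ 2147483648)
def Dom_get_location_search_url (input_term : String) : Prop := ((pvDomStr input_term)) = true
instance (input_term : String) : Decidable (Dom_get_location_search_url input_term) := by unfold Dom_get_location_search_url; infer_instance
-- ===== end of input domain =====

-- B replaces A's running-counter single-char accumulation with a chunk-and-join over index slices (idiomatic; same cost).


-- ===== PORT A =====
-- for char in input_term: if count == 2 add '/', reset; append char.upper(); count += 1
def get_location_search_url (input_term : String) : String :=
  let r := input_term.toList.foldl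
    (fun (st : List Char × Int) c =>
      let st := if st.2 = 2 then (st.1 ++ ['/'], (0 : Int)) else st
      (st.1 ++ PySem.Chars.upper [c], st.2 + 1))
    ([], 0)
  String.mk r.1

-- ===== PORT B =====
-- chars = [c.upper() for c in input_term]; '/'.join(''.join(chars[i:i+2]) for i in range(0, len(chars), 2))
def get_location_search_url_alt (input_term : String) : String :=
  let chars : List (List Char) := input_term.toList.map (fun c => PySem.Chars.upper [c])
  String.mk (PySem.Chars.join ['/']
    ((PySem.List.pyRange 0 (chars.length : Int) 2).map
      (fun i => PySem.Chars.join [] (PySem.List.slice chars (some i) (some (i + 2))))))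

-- ===== PRECONDITION & SPEC =====
def Spec_get_location_search_url (input_term : String) (out : String) : Prop := out = get_location_search_url_alt input_term
instance (input_term : String) (out : String) : Decidable (Spec_get_location_search_url input_term out) := by unfold Spec_get_location_search_url; infer_instance

-- ===== CLAIM (what is proved, stated in full; the proofs are below) =====
def Claim_equal_get_location_search_url : Prop := ∀ (input_term : String), Dom_get_location_search_url input_term → Spec_get_location_search_url input_term (get_location_search_url input_term)

-- ===== LEMMAS AND PROOFS =====

-- unified recursive description of A's loop body (count ∈ {0,1,2})
def loopSpec : List Char → Int → List Char
  | [], _ => []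
  | c :: rest, cnt =>
      (if cnt = 2 then ['/'] else []) ++ PySem.Chars.upper [c] ++
        loopSpec rest (if cnt = 2 then 1 else cnt + 1)

-- B's pair chunks of a list
def chunks2 {α : Type} : List (List α) → List (List α)
  | [] => []
  | [x] => [x]
  | x :: y :: rest => (x ++ y) :: chunks2 rest

theorem lemA (l : List Char) : ∀ (acc : List Char) (cnt : Int),
    (l.foldl
      (fun (st : List Char × Int) c =>
        let st := if st.2 = 2 then (st.1 ++ ['/'], (0 : Int)) else st
        (st.1 ++ PySem.Chars.upper [c], st.2 + 1))
      (acc, cnt)).1 = acc ++ loopSpec l cnt := by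
  induction l with
  | nil => intro acc cnt; simp [loopSpec]
  | cons c rest ih =>
      intro acc cnt
      by_cases h : cnt = 2 <;> simp [h, loopSpec, ih]

theorem cons2 (n : Int) (h : 0 < n) :
    PySem.List.pyRange 0 n 2 = 0 :: (PySem.List.pyRange 0 (n - 2) 2).map (· + 2) := by
  rw [PySem.List.pyRange_of_pos _ _ (by norm_num), PySem.List.pyRange_of_pos _ _ (by norm_num)]
  have h1 : (if (0:Int) < n then ((n - 0 + 2 - 1) / 2).toNat else 0)
      = (if (0:Int) < n - 2 then ((n - 2 - 0 + 2 - 1) / 2).toNat else 0) + 1 := by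
    split_ifs <;> omega
  rw [h1, List.range_succ_eq_map]
  simp [List.map_map]
  intro k _
  ring

theorem lemChunk (chars : List (List Char)) :
    (PySem.List.pyRange 0 (chars.length : Int) 2).map
      (fun i => PySem.Chars.join [] (PySem.List.slice chars (some i) (some (i + 2))))
      = chunks2 chars := by
  induction chars using chunks2.induct with
  | case1 =>
      rw [PySem.List.pyRange_of_pos _ _ (by norm_num)]; simp [chunks2]
  | case2 x =>
      rw [PySem.List.pyRange_of_pos _ _ (by norm_num)]
      norm_num
      rw [PySem.List.slice_to _ (by norm_num)]
      simp [chunks2, PySem.Chars.join_singleton]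
  | case3 x y rest ih =>
      rw [show ((((x :: y :: rest).length : Nat)) : Int) = (rest.length : Int) + 2 by simp; ring]
      rw [cons2 _ (by positivity)]
      simp only [List.map_cons, List.map_map, add_sub_cancel_right]
      rw [PySem.List.slice_toNat _ (by norm_num) (by norm_num)]
      have hmap : (PySem.List.pyRange 0 (rest.length : Int) 2).map
            ((fun i => PySem.Chars.join [] (PySem.List.slice (x :: y :: rest) (some i) (some (i + 2)))) ∘ (· + 2))
          = (PySem.List.pyRange 0 (rest.length : Int) 2).map
            (fun i => PySem.Chars.join [] (PySem.List.slice rest (some i) (some (i + 2)))) := by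
        apply List.map_congr_left
        intro i hi
        have hi' : 0 ≤ i := by
          have := (PySem.List.mem_pyRange_iff_of_pos (by norm_num) i).1 hi
          omega
        simp only [Function.comp]
        rw [PySem.List.slice_toNat _ (by omega) (by omega),
            PySem.List.slice_toNat _ (by omega) (by omega)]
        have e1 : (i + 2).toNat = i.toNat + 2 := by omega
        have e2 : (i + 2 + 2).toNat = (i.toNat + 2) + 2 := by omega
        rw [e1, e2]
        have e3 : ∀ m : Nat, (m + 2 + 2) - (m + 2) = 2 := by omega
        have e4 : ∀ m : Nat, m + 2 - m = 2 := by omega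
        have hd : List.drop (i.toNat + 2) (x :: y :: rest) = List.drop i.toNat rest := by
          rw [show i.toNat + 2 = i.toNat + 1 + 1 from rfl]
          simp [List.drop_succ_cons]
        rw [e3, e4, hd]
      rw [hmap, ih]
      simp [chunks2, PySem.Chars.join_cons_cons, PySem.Chars.join_singleton]

theorem join_cons (sep : List Char) (p : List Char) (ps : List (List Char)) :
    PySem.Chars.join sep (p :: ps) = p ++ (if ps = [] then [] else sep ++ PySem.Chars.join sep ps) := by
  cases ps with
  | nil => simp [PySem.Chars.join_singleton]
  | cons q rest => simp [PySem.Chars.join_cons_cons]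

theorem loop2 (l : List Char) : loopSpec l 2 = if l = [] then [] else '/' :: loopSpec l 0 := by
  cases l with
  | nil => simp [loopSpec]
  | cons c rest => simp [loopSpec]

theorem pairInd {motive : List Char → Prop} (h0 : motive []) (h1 : ∀ a, motive [a])
    (h2 : ∀ a b rest, motive rest → motive (a :: b :: rest)) : ∀ l, motive l
  | [] => h0
  | [a] => h1 a
  | a :: b :: rest => h2 a b rest (pairInd h0 h1 h2 rest)

theorem lemB (l : List Char) :
    PySem.Chars.join ['/'] (chunks2 (l.map (fun c => PySem.Chars.upper [c]))) = loopSpec l 0 := by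
  induction l using pairInd with
  | h0 => simp [chunks2, loopSpec, PySem.Chars.join_nil]
  | h1 a => simp [chunks2, loopSpec, PySem.Chars.join_singleton]
  | h2 a b rest ih =>
      simp only [List.map_cons, chunks2, join_cons]
      rw [ih]
      have hnil : (chunks2 (rest.map (fun c => PySem.Chars.upper [c])) = []) ↔ rest = [] := by
        cases rest with
        | nil => simp [chunks2]
        | cons c r => cases r <;> simp [chunks2]
      simp only [loopSpec]
      by_cases h : rest = []
      · simp [h, chunks2, loopSpec]
      · simp only [hnil.not.2 h, if_false]
        norm_num
        rw [loop2]
        simp [h]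

-- ===== VERDICT (by name: the statement is the Claim_ definition above) =====
theorem get_location_search_url_spec : Claim_equal_get_location_search_url := by
  intro s _
  unfold Spec_get_location_search_url get_location_search_url get_location_search_url_alt
  simp only []
  rw [lemA]
  simp only [List.length_map]
  have key := lemChunk (s.toList.map (fun c => PySem.Chars.upper [c]))
  simp only [List.length_map] at key
  rw [key, lemB]
  simp
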